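-- pv_equiv track=rewrite | github.com/jbkim0526/Problem_Solving | 프로그래머스/Level4/2. 쌍둥이 빌딩 숲/sol.py | solution
-- ===== SOURCE A (Python) =====
-- def nCk(n,k):
--     res = 1
--     div = 1
--     for i in range(k):
--         res *= (n-i)
--         div *= (i+1)
--     return res // div
--
-- def solution(n, count):
--
--     # dp[i][j] : i개 빌딩이 있을 때 앞에서 j개만 보이는 경우의 수
--     dp = [[0 for _ in range(n+1)] for _ in range(n+1)]
--
--     dp[1][1] = 1
--     sum_dp = [1,1] +[0]*(n-1)
--
--     for i in range(2,n+1):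
--         for j in range(1,i+1):
--
--             if j == 1:
--                 for k in range(i):
--                     dp[i][j] += (nCk(i-1,i-1-k)*sum_dp[i-1-k]*sum_dp[k]) % 1000000007
--
--             elif j == i:
--                 dp[i][j] = 1
--
--             else:
--                 for k in range(1,i-j+2):
--                     dp[i][j] += (nCk(i-1,k-1)*dp[i-k][j-1]*dp[k][1]) % 1000000007
--
--         sum_dp[i] = sum(dp[i]) % 1000000007
--
--     return dp[n][count] % 1000000007
-- ===== SOURCE B (Python) =====
-- def solution(n, count):
--     MOD = 1000000007
--     # Pascal's triangle rows 0..n-1, reduced mod MOD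
--     C = [[1]]
--     for r in range(1, n):
--         prev = C[-1]
--         C.append([1] + [(prev[t - 1] + prev[t]) % MOD for t in range(1, r)] + [1])
--     rows = [[0], [0, 1]]   # rows[i][j] mod MOD; rows[i] has length i+1
--     sums = [1, 1]          # sums[i] = sum(rows[i]) % MOD
--     for i in range(2, n + 1):
--         c = C[i - 1]
--         first = sum(c[k] * sums[i - 1 - k] * sums[k] for k in range(i)) % MOD
--         row = [0, first]
--         for j in range(2, i + 1):
--             row.append(sum(c[k - 1] * rows[i - k][j - 1] * rows[k][1]
--                            for k in range(1, i - j + 2)) % MOD)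
--         rows.append(row)
--         sums.append(sum(row) % MOD)
--     return rows[n][count]
-- ===== Notes on version B (the rewrite author's own statement) =====
-- stated objective: faster
-- what changed: B precomputes all binomial coefficients once with Pascal's triangle instead of recomputing nCk by a product loop inside the innermost k-loop, keeps the whole DP reduced mod 1000000007 (A accumulates huge exact integers), and builds each dp row and the prefix sums as growing lists instead of mutating a preallocated (n+1)x(n+1) table.
import Mathlib
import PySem

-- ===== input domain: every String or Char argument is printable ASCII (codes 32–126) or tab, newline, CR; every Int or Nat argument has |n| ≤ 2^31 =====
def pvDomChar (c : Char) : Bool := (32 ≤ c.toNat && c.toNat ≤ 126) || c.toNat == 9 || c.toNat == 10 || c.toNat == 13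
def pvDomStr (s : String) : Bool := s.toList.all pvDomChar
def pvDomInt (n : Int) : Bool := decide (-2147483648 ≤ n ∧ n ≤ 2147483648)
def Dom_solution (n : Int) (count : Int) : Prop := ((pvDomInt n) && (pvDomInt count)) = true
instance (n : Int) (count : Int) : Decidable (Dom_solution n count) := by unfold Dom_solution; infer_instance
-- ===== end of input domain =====

-- B replaces A's per-term nCk product loop by a Pascal-triangle table built once and keeps the
-- whole DP reduced mod 1000000007; equivalence of the returned value is proved on Pre_ below.

def pvM : Int := 1000000007

-- ===== PORT A =====
def nCk (n : Int) (k : Int) : Int :=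
  let rd := (PySem.List.pyRange 0 k).foldl
    (fun (s : Int × Int) i => (s.1 * (n - i), s.2 * (i + 1))) (1, 1)
  PySem.Int.floordiv rd.1 rd.2

def pvGet2 (dp : List (List Int)) (i j : Int) : Int :=
  PySem.List.pyGetD (PySem.List.pyGetD dp i []) j 0

def pvSet2 (dp : List (List Int)) (i j : Int) (v : Int) : List (List Int) :=
  dp.set i.toNat ((PySem.List.pyGetD dp i []).set j.toNat v)

def stepA_k1 (sum_dp : List Int) (i : Int) (dp : List (List Int)) (k : Int) : List (List Int) :=
  pvSet2 dp i 1 (pvGet2 dp i 1 +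
    PySem.Int.mod (nCk (i-1) (i-1-k) * PySem.List.pyGetD sum_dp (i-1-k) 0 * PySem.List.pyGetD sum_dp k 0) pvM)

def stepA_kmid (i j : Int) (dp : List (List Int)) (k : Int) : List (List Int) :=
  pvSet2 dp i j (pvGet2 dp i j +
    PySem.Int.mod (nCk (i-1) (k-1) * pvGet2 dp (i-k) (j-1) * pvGet2 dp k 1) pvM)

def stepA_j (sum_dp : List Int) (i : Int) (dp : List (List Int)) (j : Int) : List (List Int) :=
  if j = 1 then (PySem.List.pyRange 0 i).foldl (stepA_k1 sum_dp i) dp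
  else if j = i then pvSet2 dp i j 1
  else (PySem.List.pyRange 1 (i-j+2)).foldl (stepA_kmid i j) dp

def stepA (st : List (List Int) × List Int) (i : Int) : List (List Int) × List Int :=
  let dp := (PySem.List.pyRange 1 (i+1)).foldl (stepA_j st.2 i) st.1
  (dp, st.2.set i.toNat (PySem.Int.mod ((PySem.List.pyGetD dp i []).foldl (· + ·) 0) pvM))

def solution (n : Int) (count : Int) : Int :=
  let dp0 : List (List Int) :=
    (PySem.List.pyRange 0 (n+1)).map (fun _ => (PySem.List.pyRange 0 (n+1)).map (fun _ => (0:Int)))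
  let dp1 := pvSet2 dp0 1 1 1
  let sum_dp : List Int := [1, 1] ++ List.replicate (n-1).toNat 0
  let st := (PySem.List.pyRange 2 (n+1)).foldl stepA (dp1, sum_dp)
  PySem.Int.mod (pvGet2 st.1 n count) pvM

-- ===== PORT B =====

def pascalStep (C : List (List Int)) (r : Int) : List (List Int) :=
  let prev := PySem.List.pyGetD C (-1) []
  C ++ [[1] ++ ((PySem.List.pyRange 1 r).map (fun t =>
    PySem.Int.mod (PySem.List.pyGetD prev (t-1) 0 + PySem.List.pyGetD prev t 0) pvM)) ++ [1]]

def pascalC (n : Int) : List (List Int) :=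
  (PySem.List.pyRange 1 n).foldl pascalStep [[1]]

def stepB (C : List (List Int)) (st : List (List Int) × List Int) (i : Int) :
    List (List Int) × List Int :=
  let c := PySem.List.pyGetD C (i-1) []
  let first := PySem.Int.mod (((PySem.List.pyRange 0 i).map (fun k =>
      PySem.List.pyGetD c k 0 * PySem.List.pyGetD st.2 (i-1-k) 0 * PySem.List.pyGetD st.2 k 0)).sum) pvM
  let row := (PySem.List.pyRange 2 (i+1)).foldl (fun row j =>
      row ++ [PySem.Int.mod (((PySem.List.pyRange 1 (i-j+2)).map (fun k =>
        PySem.List.pyGetD c (k-1) 0 * pvGet2 st.1 (i-k) (j-1) * pvGet2 st.1 k 1)).sum) pvM]) [0, first]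
  (st.1 ++ [row], st.2 ++ [PySem.Int.mod (row.foldl (· + ·) 0) pvM])

def solution_alt (n : Int) (count : Int) : Int :=
  let st := (PySem.List.pyRange 2 (n+1)).foldl (stepB (pascalC n)) ([[0],[0,1]], [1,1])
  pvGet2 st.1 n count

-- ===== PRECONDITION & SPEC =====
-- Pre_ is exactly the set of inputs on which the Python A returns normally: it raises
-- IndexError unless dp has a row 1 (n >= 1) and dp[n][count] is in range (-(n+1) <= count <= n).
def Pre_solution (n : Int) (count : Int) : Prop := 1 ≤ n ∧ -(n+1) ≤ count ∧ count ≤ n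
instance (n : Int) (count : Int) : Decidable (Pre_solution n count) := by
  unfold Pre_solution; infer_instance

def pvWitness_solution : Int × Int := (4, 2)

def Spec_solution (n : Int) (count : Int) (out : Int) : Prop := out = solution_alt n count
instance (n : Int) (count : Int) (out : Int) : Decidable (Spec_solution n count out) := by
  unfold Spec_solution; infer_instance

-- ===== CLAIM (what is proved, stated in full; the proofs are below) =====
def Claim_equal_solution : Prop := ∀ (n : Int) (count : Int), Dom_solution n count →
  Pre_solution n count → Spec_solution n count (solution n count)

-- ===== LEMMAS AND PROOFS =====

lemma pvM_pos : (0:Int) < pvM := by decide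

lemma pyRange_one_eq_map (a b : Int) :
    PySem.List.pyRange a b = (List.range (b-a).toNat).map (fun (k : Nat) => a + (k:Int)) := by
  rw [PySem.List.pyRange_of_pos a b one_pos]
  have h : (if a < b then ((b - a + 1 - 1) / 1).toNat else 0) = (b-a).toNat := by
    split <;> omega
  rw [h]
  exact List.map_congr_left fun k _ => by ring

lemma pyGetD_neg_one {α : Type} (l : List α) (d : α) (h : l ≠ []) :
    PySem.List.pyGetD l (-1) d = l.getD (l.length - 1) d := by
  have hl : 0 < l.length := List.length_pos_iff.mpr h
  have : PySem.List.pyIdx? l.length (-1) = some (l.length - 1) := by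
    simp [PySem.List.pyIdx?]; omega
  simp [PySem.List.pyGetD, PySem.List.pyGet?, this, List.getD_eq_getElem?_getD]

lemma pyGetD_neg {α : Type} (l : List α) (d : α) (i : Int) (h0 : i < 0) (h1 : -(l.length:Int) ≤ i) :
    PySem.List.pyGetD l i d = l.getD (l.length - (-i).toNat) d := by
  have hx : PySem.List.pyIdx? l.length i = some (l.length - (-i).toNat) := by
    rw [PySem.List.pyIdx?, if_neg (by omega), if_pos (by omega)]
  simp [PySem.List.pyGetD, PySem.List.pyGet?, hx, List.getD_eq_getElem?_getD]

lemma nCk_eq_choose (N K : Nat) (h : K ≤ N) :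
    nCk (N:Int) (K:Int) = (N.choose K : Int) := by
  have hres : ∀ (m : Nat), m ≤ N →
      (List.range m).foldl (fun (a:Int) (t:Nat) => a * ((N:Int) - (t:Int))) 1
        = (N.descFactorial m : Int) := by
    intro m
    induction m with
    | zero => simp
    | succ m ih =>
      intro hm
      rw [List.range_succ, List.foldl_append, ih (by omega)]
      simp [Nat.descFactorial_succ]
      push_cast [Nat.cast_sub (by omega : m ≤ N)]
      ring
  have hdiv : ∀ (m : Nat),
      (List.range m).foldl (fun (a:Int) (t:Nat) => a * ((t:Int) + 1)) 1
        = (m.factorial : Int) := by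
    intro m
    induction m with
    | zero => simp
    | succ m ih =>
      rw [List.range_succ, List.foldl_append, ih]
      simp [Nat.factorial_succ]; ring
  show PySem.Int.floordiv _ _ = _
  rw [PySem.List.pyRange_zero_natCast, List.foldl_map,
      PySem.List.foldl_prod_mk (f := fun (a:Int) (t:Nat) => a * ((N:Int) - (t:Int)))
        (g := fun (a:Int) (t:Nat) => a * ((t:Int) + 1))]
  simp only [hres K h, hdiv K]
  rw [PySem.Int.floordiv_natCast]
  rw [Nat.choose_eq_descFactorial_div_factorial]

lemma getD_sandwich_mid (a b : Int) (xs : List Int) (t : Nat) (h1 : 1 ≤ t)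
    (h2 : t - 1 < xs.length) :
    ([a] ++ xs ++ [b]).getD t 0 = xs.getD (t-1) 0 := by
  cases t with
  | zero => omega
  | succ t' =>
    rw [List.append_assoc, List.cons_append, List.getD_cons_succ, List.nil_append,
        List.getD_append _ _ _ _ (by omega)]
    congr 1

lemma getD_sandwich_last (a b : Int) (xs : List Int) :
    ([a] ++ xs ++ [b]).getD (xs.length + 1) 0 = b := by
  rw [List.append_assoc, List.cons_append, List.getD_cons_succ, List.nil_append,
      List.getD_append_right _ _ _ _ (le_refl _)]
  simp

def pascalQ (L : List (List Int)) (len : Nat) : Prop :=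
  L.length = len ∧ ∀ r < len, (L.getD r []).length = r + 1 ∧
    ∀ t ≤ r, (L.getD r []).getD t 0 = ((Nat.choose r t : Int) % pvM)

lemma pascal_aux (m : Nat) :
    pascalQ ((PySem.List.pyRange 1 (1 + (m:Int))).foldl pascalStep [[1]]) (m + 1) := by
  induction m with
  | zero =>
    have h0 : PySem.List.pyRange 1 (1 + ((0:Nat):Int)) = [] := by
      rw [pyRange_one_eq_map]; norm_num
    rw [h0]
    refine ⟨rfl, ?_⟩
    intro r hr
    interval_cases r
    exact ⟨rfl, by intro t ht; interval_cases t; decide⟩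
  | succ m ih =>
    have hsplit : PySem.List.pyRange 1 (1 + ((m+1:Nat):Int)) =
        PySem.List.pyRange 1 (1 + (m:Int)) ++ [1 + (m:Int)] := by
      have hc : (1 + ((m+1:Nat):Int)) = (1 + (m:Int)) + 1 := by push_cast; ring
      rw [hc]
      exact PySem.List.pyRange_one_succ_right (by omega)
    rw [hsplit, List.foldl_append]
    obtain ⟨hlen, hrows⟩ := ih
    set L := (PySem.List.pyRange 1 (1 + (m:Int))).foldl pascalStep [[1]] with hLdef
    simp only [List.foldl_cons, List.foldl_nil]
    have hLne : L ≠ [] := by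
      intro hnil; rw [hnil] at hlen; simp at hlen
    have hprev : PySem.List.pyGetD L (-1) [] = L.getD m [] := by
      rw [pyGetD_neg_one _ _ hLne, hlen]; simp
    obtain ⟨hplen, hpent⟩ := hrows m (by omega)
    rw [pascalStep, hprev]
    set mid := (PySem.List.pyRange 1 (1 + (m:Int))).map (fun t =>
      PySem.Int.mod (PySem.List.pyGetD (L.getD m []) (t-1) 0 +
        PySem.List.pyGetD (L.getD m []) t 0) pvM) with hmiddef
    have hmidlen : mid.length = m := by
      rw [hmiddef, List.length_map, pyRange_one_eq_map, List.length_map, List.length_range]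
      omega
    have hmident : ∀ u < m, mid.getD u 0 =
        PySem.Int.mod (PySem.List.pyGetD (L.getD m []) ((1+(u:Int))-1) 0 +
          PySem.List.pyGetD (L.getD m []) (1+(u:Int)) 0) pvM := by
      intro u hu
      rw [hmiddef, pyRange_one_eq_map, List.map_map]
      have h1 : ((1:Int) + (m:Int) - 1).toNat = m := by omega
      rw [h1]
      exact PySem.List.getD_map_range _ _ _ _ hu
    constructor
    · simp [hlen]
    · intro r hr
      rcases Nat.lt_or_ge r (m+1) with hcase | hcase
      · rw [List.getD_append _ _ _ _ (by omega)]
        exact hrows r hcase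
      · have hreq : r = m + 1 := by omega
        subst hreq
        rw [List.getD_append_right _ _ _ _ (by omega), hlen]
        simp only [Nat.sub_self, List.getD_cons_zero]
        constructor
        · simp [hmidlen]
        · intro t ht
          rcases Nat.eq_zero_or_pos t with ht0 | ht1
          · subst ht0
            simp only [List.cons_append, List.getD_cons_zero]
            rw [Nat.choose_zero_right]; decide
          rcases Nat.lt_or_ge t (m+1) with htm | htm
          · -- middle entry: 1 ≤ t ≤ m
            rw [getD_sandwich_mid _ _ _ _ (by omega) (by rw [hmidlen]; omega),
                hmident (t-1) (by omega)]
            have hc1 : (1:Int) + ((t-1:Nat):Int) - 1 = ((t-1:Nat):Int) := by ring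
            have hc2 : (1:Int) + ((t-1:Nat):Int) = ((t:Nat):Int) := by omega
            rw [hc1, hc2, PySem.List.pyGetD_natCast, PySem.List.pyGetD_natCast,
                hpent (t-1) (by omega), hpent t (by omega),
                PySem.Int.mod_eq_emod_of_pos pvM_pos, ← Int.add_emod]
            have hch : Nat.choose m (t-1) + Nat.choose m t = Nat.choose (m+1) t := by
              have h := Nat.choose_succ_succ m (t-1)
              have ht' : (t - 1).succ = t := by omega
              rw [ht'] at h
              simp only [Nat.succ_eq_add_one] at h
              omega
            rw [show ((Nat.choose m (t-1) : Int) + (Nat.choose m t : Int)) = ((Nat.choose (m+1) t : Int)) by push_cast [← hch]; ring]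
          · -- trailing 1 : t = m+1
            have hteq : t = m + 1 := by omega
            subst hteq
            have hix : m + 1 = mid.length + 1 := by rw [hmidlen]
            rw [hix, getD_sandwich_last]
            rw [Nat.choose_self]; decide

lemma pascalC_spec (n : Int) (h : 2 ≤ n) : pascalQ (pascalC n) n.toNat := by
  have hn : n = 1 + ((n.toNat - 1 : Nat) : Int) := by omega
  have hq := pascal_aux (n.toNat - 1)
  rw [← hn] at hq
  have : n.toNat - 1 + 1 = n.toNat := by omega
  rwa [this] at hq

lemma getD_set_self {α : Type} (l : List α) (n : Nat) (a d : α) (h : n < l.length) :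
    (l.set n a).getD n d = a := by
  simp [List.getD_eq_getElem?_getD, List.getElem?_set_self h]

lemma getD_set_ne {α : Type} (l : List α) (n m : Nat) (a d : α) (h : n ≠ m) :
    (l.set n a).getD m d = l.getD m d := by
  simp [List.getD_eq_getElem?_getD, List.getElem?_set_ne h]

lemma pvGet2_nonneg (dp : List (List Int)) (i j : Int) (h0 : 0 ≤ i) (h1 : 0 ≤ j) :
    pvGet2 dp i j = (dp.getD i.toNat []).getD j.toNat 0 := by
  simp [pvGet2, PySem.List.pyGetD_of_nonneg _ _ h0, PySem.List.pyGetD_of_nonneg _ _ h1]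

lemma length_pvSet2 (dp : List (List Int)) (i j v : Int) : (pvSet2 dp i j v).length = dp.length := by
  simp [pvSet2]

lemma getD_pvSet2_ne (dp : List (List Int)) (i j v : Int) (r : Nat) (h : r ≠ i.toNat) :
    (pvSet2 dp i j v).getD r [] = dp.getD r [] := by
  exact getD_set_ne _ _ _ _ _ (fun hh => h (by omega))

lemma getD_pvSet2_self (dp : List (List Int)) (i j v : Int) (h0 : 0 ≤ i)
    (hi : i.toNat < dp.length) :
    (pvSet2 dp i j v).getD i.toNat [] = (dp.getD i.toNat []).set j.toNat v := by
  rw [pvSet2, PySem.List.pyGetD_of_nonneg _ _ h0, getD_set_self _ _ _ _ hi]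

lemma pvGet2_pvSet2_self (dp : List (List Int)) (i j v : Int) (h0 : 0 ≤ i) (h1 : 0 ≤ j)
    (hi : i.toNat < dp.length) (hj : j.toNat < (dp.getD i.toNat []).length) :
    pvGet2 (pvSet2 dp i j v) i j = v := by
  rw [pvGet2_nonneg _ _ _ h0 h1, getD_pvSet2_self _ _ _ _ h0 hi, getD_set_self _ _ _ _ hj]

lemma pvSet2_pvSet2_same (dp : List (List Int)) (i j v w : Int) (h0 : 0 ≤ i)
    (hi : i.toNat < dp.length) :
    pvSet2 (pvSet2 dp i j v) i j w = pvSet2 dp i j w := by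
  unfold pvSet2
  rw [PySem.List.pyGetD_of_nonneg _ _ h0, PySem.List.pyGetD_of_nonneg _ _ h0,
      getD_set_self _ _ _ _ hi, List.set_set, List.set_set]

lemma pvSet2_get_self (dp : List (List Int)) (i j : Int) (h0 : 0 ≤ i) (h1 : 0 ≤ j)
    (hi : i.toNat < dp.length) (hj : j.toNat < (dp.getD i.toNat []).length) :
    pvSet2 dp i j (pvGet2 dp i j) = dp := by
  unfold pvSet2
  rw [pvGet2_nonneg _ _ _ h0 h1, PySem.List.pyGetD_of_nonneg _ _ h0]
  rw [List.getD_eq_getElem _ _ hi] at hj ⊢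
  rw [List.getD_eq_getElem _ _ hj, List.set_getElem_self, List.set_getElem_self]

lemma foldl_pvSet2_add (i j : Int) (h0 : 0 ≤ i) (h1 : 0 ≤ j)
    (t : List (List Int) → Int → Int)
    (ks : List Int) (ht : ∀ d v k, k ∈ ks → t (pvSet2 d i j v) k = t d k)
    (dp : List (List Int))
    (hi : i.toNat < dp.length) (hj : j.toNat < (dp.getD i.toNat []).length) :
    ks.foldl (fun d k => pvSet2 d i j (pvGet2 d i j + t d k)) dp
      = pvSet2 dp i j (pvGet2 dp i j + (ks.map (t dp)).sum) := by
  induction ks generalizing dp with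
  | nil => simp [pvSet2_get_self dp i j h0 h1 hi hj]
  | cons k ks ih =>
    rw [List.foldl_cons]
    have hi' : i.toNat < (pvSet2 dp i j (pvGet2 dp i j + t dp k)).length := by
      rwa [length_pvSet2]
    have hj' : j.toNat < ((pvSet2 dp i j (pvGet2 dp i j + t dp k)).getD i.toNat []).length := by
      rwa [getD_pvSet2_self _ _ _ _ h0 hi, List.length_set]
    rw [ih (fun d v k hk => ht d v k (List.mem_cons_of_mem _ hk)) _ hi' hj']
    rw [pvGet2_pvSet2_self _ _ _ _ h0 h1 hi hj, pvSet2_pvSet2_same _ _ _ _ _ h0 hi]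
    have hmap : (ks.map (t (pvSet2 dp i j (pvGet2 dp i j + t dp k)))) = ks.map (t dp) :=
      List.map_congr_left fun x hx => ht _ _ _ (List.mem_cons_of_mem _ hx)
    rw [hmap]
    congr 1
    simp [List.sum_cons]
    ring

lemma sum_emod_congr {α : Type} (ks : List α) (f g : α → Int)
    (h : ∀ k ∈ ks, f k % pvM = g k % pvM) :
    (ks.map f).sum % pvM = (ks.map g).sum % pvM := by
  induction ks with
  | nil => rfl
  | cons k ks ih =>
    simp only [List.map_cons, List.sum_cons]
    rw [Int.add_emod, h k (by simp), ih (fun x hx => h x (by simp [hx])), ← Int.add_emod]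

lemma sum_getD_range (l : List Int) :
    l.sum = ((List.range l.length).map (fun t => l.getD t 0)).sum := by
  induction l using List.reverseRecOn with
  | nil => simp
  | append_singleton l a ih =>
    rw [List.sum_append, List.length_append, List.length_singleton, List.range_succ]
    simp only [List.map_append, List.sum_append]
    congr 1
    · rw [ih]
      congr 1
      exact List.map_congr_left fun t ht => by
        rw [List.getD_append _ _ _ _ (List.mem_range.mp ht)]
    · simp

lemma emod_emod (x : Int) : (x % pvM) % pvM = x % pvM := Int.emod_emod_of_dvd _ dvd_rfl

lemma mul3_emod_congr (a b x y u v : Int) (ha : a % pvM = b % pvM) (hx : x % pvM = y % pvM)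
    (hu : u % pvM = v % pvM) : (a*x*u) % pvM = (b*y*v) % pvM := by
  rw [Int.mul_emod (a*x) u, Int.mul_emod a x, ha, hx, hu, ← Int.mul_emod b y, ← Int.mul_emod]

def sA1 (sd : List Int) (i : Nat) : Int :=
  ((PySem.List.pyRange 0 (i:Int)).map (fun k =>
    PySem.Int.mod (nCk ((i:Int)-1) ((i:Int)-1-k) * PySem.List.pyGetD sd ((i:Int)-1-k) 0 *
      PySem.List.pyGetD sd k 0) pvM)).sum

def sAmid (dp : List (List Int)) (i t : Nat) : Int :=
  ((PySem.List.pyRange 1 ((i:Int)-(t:Int)+2)).map (fun k =>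
    PySem.Int.mod (nCk ((i:Int)-1) (k-1) * pvGet2 dp ((i:Int)-k) ((t:Int)-1) * pvGet2 dp k 1) pvM)).sum

def avalA (dp : List (List Int)) (sd : List Int) (i t : Nat) : Int :=
  if t = 1 then sA1 sd i else if t = i then 1 else sAmid dp i t

-- state of A's dp table while filling row i (columns 1..j0 done)

def MidA (n : Int) (dp : List (List Int)) (sd : List Int) (i j0 : Nat)
    (d : List (List Int)) : Prop :=
  d.length = n.toNat + 1 ∧
  (∀ r : Nat, r ≠ i → d.getD r [] = dp.getD r []) ∧
  (d.getD i []).length = n.toNat + 1 ∧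
  (∀ t : Nat, (d.getD i []).getD t 0 = if 1 ≤ t ∧ t ≤ j0 then avalA dp sd i t else 0)

def sB (c : List Int) (rows : List (List Int)) (i t : Nat) : Int :=
  PySem.Int.mod (((PySem.List.pyRange 1 ((i:Int)-(t:Int)+2)).map (fun k =>
    PySem.List.pyGetD c (k-1) 0 * pvGet2 rows ((i:Int)-k) ((t:Int)-1) * pvGet2 rows k 1)).sum) pvM

lemma pvGet2_pvSet2_ne_row (d : List (List Int)) (i j v a b : Int) (h0 : 0 ≤ a)
    (h : a.toNat ≠ i.toNat) :
    pvGet2 (pvSet2 d i j v) a b = pvGet2 d a b := by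
  unfold pvGet2
  rw [PySem.List.pyGetD_of_nonneg _ _ h0, PySem.List.pyGetD_of_nonneg _ _ h0,
      getD_pvSet2_ne _ _ _ _ _ h]

lemma pvGet2_congr_row (d dp : List (List Int)) (a b : Int) (h0 : 0 ≤ a)
    (h : d.getD a.toNat [] = dp.getD a.toNat []) : pvGet2 d a b = pvGet2 dp a b := by
  unfold pvGet2
  rw [PySem.List.pyGetD_of_nonneg _ _ h0, PySem.List.pyGetD_of_nonneg _ _ h0, h]

lemma midA_init (n : Int) (i : Nat) (dp : List (List Int)) (sd : List Int)
    (hi2 : 2 ≤ i) (hin : i ≤ n.toNat)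
    (hA1 : dp.length = n.toNat + 1)
    (hA2 : (dp.getD i []).length = n.toNat + 1)
    (hz : ∀ t : Nat, (dp.getD i []).getD t 0 = 0) :
    MidA n dp sd i 1 (stepA_j sd (i:Int) dp 1) := by
  have hstep : stepA_j sd (i:Int) dp 1 =
      (PySem.List.pyRange 0 (i:Int)).foldl (stepA_k1 sd (i:Int)) dp := by
    simp [stepA_j]
  have hib : ((i:Int)).toNat < dp.length := by
    simp only [Int.toNat_natCast, hA1]; omega
  have hjb : ((1:Int)).toNat < (dp.getD ((i:Int)).toNat []).length := by
    simp only [Int.toNat_natCast, Int.toNat_one, hA2]; omega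
  have hfold := foldl_pvSet2_add (i:Int) 1 (by positivity) (by norm_num)
    (fun d k => PySem.Int.mod (nCk ((i:Int)-1) ((i:Int)-1-k) * PySem.List.pyGetD sd ((i:Int)-1-k) 0 *
      PySem.List.pyGetD sd k 0) pvM)
    (PySem.List.pyRange 0 (i:Int)) (fun d v k _ => rfl) dp hib hjb
  have hfun : stepA_k1 sd (i:Int) = (fun d k => pvSet2 d (i:Int) 1 (pvGet2 d (i:Int) 1 +
      PySem.Int.mod (nCk ((i:Int)-1) ((i:Int)-1-k) * PySem.List.pyGetD sd ((i:Int)-1-k) 0 *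
        PySem.List.pyGetD sd k 0) pvM)) := by
    funext d k; rfl
  have hbody : (PySem.List.pyRange 0 (i:Int)).foldl (stepA_k1 sd (i:Int)) dp =
      pvSet2 dp (i:Int) 1 (pvGet2 dp (i:Int) 1 + sA1 sd i) := by
    rw [hfun, hfold]; rfl
  have hget0 : pvGet2 dp (i:Int) 1 = 0 := by
    rw [pvGet2_nonneg _ _ _ (by positivity) (by norm_num)]
    simp only [Int.toNat_natCast, Int.toNat_one]
    exact hz 1
  rw [hstep, hbody, hget0, zero_add]
  refine ⟨by rw [length_pvSet2, hA1], ?_, ?_, ?_⟩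
  · intro r hr
    exact getD_pvSet2_ne _ _ _ _ _ (by simp; omega)
  · have := getD_pvSet2_self dp (i:Int) 1 (sA1 sd i) (by positivity) hib
    simp only [Int.toNat_natCast, Int.toNat_one] at this
    rw [this, List.length_set, hA2]
  · intro t
    have hrow := getD_pvSet2_self dp (i:Int) 1 (sA1 sd i) (by positivity) hib
    simp only [Int.toNat_natCast, Int.toNat_one] at hrow
    rw [hrow]
    by_cases ht : t = 1
    · subst ht
      rw [getD_set_self _ _ _ _ (by rw [hA2]; omega)]
      simp [avalA]
    · rw [getD_set_ne _ _ _ _ _ (by omega), hz t]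
      have : ¬ (1 ≤ t ∧ t ≤ 1) := by omega
      simp [this]

lemma midA_step (n : Int) (i : Nat) (dp : List (List Int)) (sd : List Int)
    (hi2 : 2 ≤ i) (hin : i ≤ n.toNat) (j : Nat) (hj2 : 2 ≤ j) (hji : j < i)
    (d : List (List Int)) (h : MidA n dp sd i (j-1) d) :
    MidA n dp sd i j (stepA_j sd (i:Int) d (j:Int)) := by
  obtain ⟨hd1, hd2, hd3, hd4⟩ := h
  have hstep : stepA_j sd (i:Int) d (j:Int) =
      (PySem.List.pyRange 1 ((i:Int)-(j:Int)+2)).foldl (stepA_kmid (i:Int) (j:Int)) d := by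
    rw [stepA_j, if_neg (by omega), if_neg (by omega)]
  have hib : ((i:Int)).toNat < d.length := by
    simp only [Int.toNat_natCast, hd1]; omega
  have hjb : ((j:Int)).toNat < (d.getD ((i:Int)).toNat []).length := by
    simp only [Int.toNat_natCast, hd3]; omega
  have ht : ∀ d' v k, k ∈ PySem.List.pyRange 1 ((i:Int)-(j:Int)+2) →
      (fun d' k => PySem.Int.mod (nCk ((i:Int)-1) (k-1) * pvGet2 d' ((i:Int)-k) ((j:Int)-1) *
        pvGet2 d' k 1) pvM) (pvSet2 d' (i:Int) (j:Int) v) k =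
      (fun d' k => PySem.Int.mod (nCk ((i:Int)-1) (k-1) * pvGet2 d' ((i:Int)-k) ((j:Int)-1) *
        pvGet2 d' k 1) pvM) d' k := by
    intro d' v k hk
    rw [PySem.List.mem_pyRange_one] at hk
    simp only
    rw [pvGet2_pvSet2_ne_row _ _ _ _ _ _ (by omega) (by omega),
        pvGet2_pvSet2_ne_row _ _ _ _ _ _ (by omega) (by omega)]
  have hfold := foldl_pvSet2_add (i:Int) (j:Int) (by positivity) (by positivity)
    (fun d' k => PySem.Int.mod (nCk ((i:Int)-1) (k-1) * pvGet2 d' ((i:Int)-k) ((j:Int)-1) *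
      pvGet2 d' k 1) pvM)
    (PySem.List.pyRange 1 ((i:Int)-(j:Int)+2)) ht d hib hjb
  have hfun : stepA_kmid (i:Int) (j:Int) = (fun d' k => pvSet2 d' (i:Int) (j:Int) (pvGet2 d' (i:Int) (j:Int) +
      PySem.Int.mod (nCk ((i:Int)-1) (k-1) * pvGet2 d' ((i:Int)-k) ((j:Int)-1) * pvGet2 d' k 1) pvM)) := by
    funext d' k; rfl
  have hget0 : pvGet2 d (i:Int) (j:Int) = 0 := by
    rw [pvGet2_nonneg _ _ _ (by positivity) (by positivity)]
    simp only [Int.toNat_natCast]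
    rw [hd4 j]
    simp [show ¬ (1 ≤ j ∧ j ≤ j - 1) by omega]
  have hmapdp : (PySem.List.pyRange 1 ((i:Int)-(j:Int)+2)).map
      ((fun d' k => PySem.Int.mod (nCk ((i:Int)-1) (k-1) * pvGet2 d' ((i:Int)-k) ((j:Int)-1) *
        pvGet2 d' k 1) pvM) d) =
      (PySem.List.pyRange 1 ((i:Int)-(j:Int)+2)).map (fun k =>
        PySem.Int.mod (nCk ((i:Int)-1) (k-1) * pvGet2 dp ((i:Int)-k) ((j:Int)-1) *
        pvGet2 dp k 1) pvM) := by
    refine List.map_congr_left fun k hk => ?_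
    rw [PySem.List.mem_pyRange_one] at hk
    simp only
    rw [pvGet2_congr_row d dp ((i:Int)-k) _ (by omega) (hd2 _ (by omega)),
        pvGet2_congr_row d dp k _ (by omega) (hd2 _ (by omega))]
  have hbody : stepA_j sd (i:Int) d (j:Int) =
      pvSet2 d (i:Int) (j:Int) (sAmid dp i j) := by
    rw [hstep, hfun, hfold, hget0, zero_add, hmapdp]; rfl
  rw [hbody]
  refine ⟨by rw [length_pvSet2, hd1], ?_, ?_, ?_⟩
  · intro r hr
    rw [getD_pvSet2_ne _ _ _ _ _ (by simp only [Int.toNat_natCast]; omega)]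
    exact hd2 r hr
  · have hrow := getD_pvSet2_self d (i:Int) (j:Int) (sAmid dp i j) (by positivity) hib
    simp only [Int.toNat_natCast] at hrow
    rw [hrow, List.length_set, hd3]
  · intro t
    have hrow := getD_pvSet2_self d (i:Int) (j:Int) (sAmid dp i j) (by positivity) hib
    simp only [Int.toNat_natCast] at hrow
    rw [hrow]
    by_cases ht' : t = j
    · subst ht'
      rw [getD_set_self _ _ _ _ (by rw [hd3]; omega),
          if_pos (show 1 ≤ t ∧ t ≤ t by omega), avalA,
          if_neg (show ¬ t = 1 by omega), if_neg (show ¬ t = i by omega)]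
    · rw [getD_set_ne _ _ _ _ _ (by omega), hd4 t]
      by_cases hcase : 1 ≤ t ∧ t ≤ j - 1
      · rw [if_pos hcase, if_pos (by omega)]
      · rw [if_neg hcase, if_neg (by omega)]

lemma midA_last (n : Int) (i : Nat) (dp : List (List Int)) (sd : List Int)
    (hi2 : 2 ≤ i) (hin : i ≤ n.toNat)
    (d : List (List Int)) (h : MidA n dp sd i (i-1) d) :
    MidA n dp sd i i (stepA_j sd (i:Int) d (i:Int)) := by
  obtain ⟨hd1, hd2, hd3, hd4⟩ := h
  have hib : ((i:Int)).toNat < d.length := by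
    simp only [Int.toNat_natCast, hd1]; omega
  have hstep : stepA_j sd (i:Int) d (i:Int) = pvSet2 d (i:Int) (i:Int) 1 := by
    rw [stepA_j, if_neg (by omega), if_pos rfl]
  rw [hstep]
  refine ⟨by rw [length_pvSet2, hd1], ?_, ?_, ?_⟩
  · intro r hr
    rw [getD_pvSet2_ne _ _ _ _ _ (by simp only [Int.toNat_natCast]; omega)]
    exact hd2 r hr
  · have hrow := getD_pvSet2_self d (i:Int) (i:Int) 1 (by positivity) hib
    simp only [Int.toNat_natCast] at hrow
    rw [hrow, List.length_set, hd3]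
  · intro t
    have hrow := getD_pvSet2_self d (i:Int) (i:Int) 1 (by positivity) hib
    simp only [Int.toNat_natCast] at hrow
    rw [hrow]
    by_cases ht' : t = i
    · subst ht'
      rw [getD_set_self _ _ _ _ (by rw [hd3]; omega),
          if_pos (show 1 ≤ t ∧ t ≤ t by omega), avalA,
          if_neg (show ¬ t = 1 by omega), if_pos rfl]
    · rw [getD_set_ne _ _ _ _ _ (by omega), hd4 t]
      by_cases hcase : 1 ≤ t ∧ t ≤ i - 1
      · rw [if_pos hcase, if_pos (by omega)]
      · rw [if_neg hcase, if_neg (by omega)]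

lemma midA_fold (n : Int) (i : Nat) (dp : List (List Int)) (sd : List Int)
    (hi2 : 2 ≤ i) (hin : i ≤ n.toNat)
    (hA1 : dp.length = n.toNat + 1)
    (hA2 : (dp.getD i []).length = n.toNat + 1)
    (hz : ∀ t : Nat, (dp.getD i []).getD t 0 = 0) :
    MidA n dp sd i i ((PySem.List.pyRange 1 ((i:Int)+1)).foldl (stepA_j sd (i:Int)) dp) := by
  have haux : ∀ m : Nat, m ≤ i - 2 →
      MidA n dp sd i (1+m) ((PySem.List.pyRange 2 (2+(m:Int))).foldl (stepA_j sd (i:Int))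
        (stepA_j sd (i:Int) dp 1)) := by
    intro m
    induction m with
    | zero =>
      intro _
      have h0 : PySem.List.pyRange 2 (2 + ((0:Nat):Int)) = [] := by
        rw [pyRange_one_eq_map]; norm_num
      rw [h0]
      exact midA_init n i dp sd hi2 hin hA1 hA2 hz
    | succ m ih =>
      intro hm
      have hc : (2 + ((m+1:Nat):Int)) = (2 + (m:Int)) + 1 := by push_cast; ring
      rw [hc, PySem.List.pyRange_one_succ_right (by omega), List.foldl_append]
      simp only [List.foldl_cons, List.foldl_nil]
      have hstep := midA_step n i dp sd hi2 hin (2+m) (by omega) (by omega)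
        _ (by have := ih (by omega); simpa [show 2+m-1 = 1+m by omega] using this)
      have hcast : ((2+m:Nat):Int) = 2 + (m:Int) := by push_cast; ring
      rw [hcast] at hstep
      simpa [show 1+(m+1) = 2+m by omega] using hstep
  have hsplit1 : PySem.List.pyRange 1 ((i:Int)+1) = 1 :: PySem.List.pyRange 2 ((i:Int)+1) := by
    have := PySem.List.pyRange_one_cons (a := 1) (b := (i:Int)+1) (by omega)
    simpa using this
  have hsplit2 : PySem.List.pyRange 2 ((i:Int)+1) = PySem.List.pyRange 2 (i:Int) ++ [(i:Int)] := by
    exact PySem.List.pyRange_one_succ_right (by omega)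
  rw [hsplit1, hsplit2]
  simp only [List.foldl_cons, List.foldl_append, List.foldl_nil]
  have hmain := haux (i-2) (le_refl _)
  have hcast : (2 + ((i-2:Nat):Int)) = (i:Int) := by omega
  rw [hcast] at hmain
  have hfin := midA_last n i dp sd hi2 hin _ (by simpa [show 1+(i-2) = i-1 by omega] using hmain)
  exact hfin

def DPInv (n : Int) (i : Nat) (stA stB : List (List Int) × List Int) : Prop :=
  stA.1.length = n.toNat + 1 ∧
  (∀ r : Nat, (stA.1.getD r []).length = if r < n.toNat + 1 then n.toNat + 1 else 0) ∧
  stA.2.length = n.toNat + 1 ∧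
  stB.1.length = i + 1 ∧
  stB.2.length = i + 1 ∧
  (∀ r ≤ i, (stB.1.getD r []).length = r + 1) ∧
  (∀ r, 1 ≤ r → r ≤ i → (stB.1.getD r []).getD r 0 = 1) ∧
  (∀ r ≤ i, ∀ t : Nat,
      0 ≤ (stA.1.getD r []).getD t 0 ∧
      (stA.1.getD r []).getD t 0 % pvM = (if t ≤ r then (stB.1.getD r []).getD t 0 else 0)) ∧
  (∀ r, i < r → ∀ t : Nat, (stA.1.getD r []).getD t 0 = 0) ∧
  (∀ r ≤ i, stA.2.getD r 0 = stB.2.getD r 0)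

lemma getD_zeros (l : List Int) (h : ∀ x ∈ l, x = 0) (t : Nat) : l.getD t 0 = 0 := by
  rw [List.getD_eq_getElem?_getD]
  cases hx : l[t]? with
  | none => rfl
  | some a => exact h a (List.mem_of_getElem? hx)

lemma inv_init (n : Int) (h : 1 ≤ n) :
    DPInv n 1
      (pvSet2 ((PySem.List.pyRange 0 (n+1)).map (fun _ => (PySem.List.pyRange 0 (n+1)).map (fun _ => (0:Int)))) 1 1 1,
       [1, 1] ++ List.replicate (n-1).toNat 0)
      ([[0],[0,1]], [1,1]) := by
  have hrange : (PySem.List.pyRange 0 (n+1)).length = n.toNat + 1 := by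
    rw [pyRange_one_eq_map]; simp; omega
  set z := (PySem.List.pyRange 0 (n+1)).map (fun _ => (0:Int)) with hz
  have hzlen : z.length = n.toNat + 1 := by rw [hz, List.length_map, hrange]
  have hzget : ∀ t : Nat, z.getD t 0 = 0 := by
    intro t
    refine getD_zeros _ ?_ t
    intro x hx
    rcases List.mem_map.mp hx with ⟨_, _, hxx⟩
    omega
  set dp0 := (PySem.List.pyRange 0 (n+1)).map (fun _ => z) with hdp0
  have hd0len : dp0.length = n.toNat + 1 := by rw [hdp0, List.length_map, hrange]
  have hd0get : ∀ r : Nat, r < n.toNat + 1 → dp0.getD r [] = z := by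
    intro r hr
    rw [hdp0, List.getD_eq_getElem _ _ (by rw [List.length_map, hrange]; omega), List.getElem_map]
  have hd0out : ∀ r : Nat, ¬ r < n.toNat + 1 → dp0.getD r [] = [] := by
    intro r hr
    rw [List.getD_eq_getElem?_getD, List.getElem?_eq_none (by rw [hd0len]; omega)]
    rfl
  have h1lt : (1:Int).toNat < dp0.length := by rw [hd0len]; omega
  have hset_len : (pvSet2 dp0 1 1 1).length = n.toNat + 1 := by rw [length_pvSet2, hd0len]
  have hrow1 : (pvSet2 dp0 1 1 1).getD 1 [] = z.set 1 1 := by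
    have h2 := getD_pvSet2_self dp0 1 1 1 (by norm_num) h1lt
    simp only [Int.toNat_one] at h2
    rw [hd0get 1 (by omega)] at h2
    exact h2
  have hrowne : ∀ r : Nat, r ≠ 1 → (pvSet2 dp0 1 1 1).getD r [] = dp0.getD r [] := by
    intro r hr
    exact getD_pvSet2_ne dp0 1 1 1 r (by omega)
  refine ⟨hset_len, ?_, by simp [List.length_replicate]; omega, rfl, rfl, ?_, ?_, ?_, ?_, ?_⟩
  · -- row lengths
    intro r
    by_cases hr1 : r = 1
    · subst hr1
      rw [hrow1, List.length_set, hzlen]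
      simp [show (1:Nat) < n.toNat + 1 by omega]
    · rw [hrowne r hr1]
      by_cases hrin : r < n.toNat + 1
      · rw [hd0get r hrin, hzlen]; simp [hrin]
      · rw [hd0out r hrin]; simp [hrin]
  · -- B row lengths
    intro r hr
    interval_cases r <;> rfl
  · -- B diagonal
    intro r h1r h2r
    interval_cases r <;> rfl
  · -- entries
    intro r hr t
    interval_cases r
    · rw [hrowne 0 (by omega), hd0get 0 (by omega), hzget t]
      refine ⟨le_refl 0, ?_⟩
      rcases Nat.eq_zero_or_pos t with h0 | h0
      · subst h0; rfl
      · simp [show ¬ t ≤ 0 by omega]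
    · rw [hrow1]
      by_cases ht1 : t = 1
      · subst ht1
        rw [getD_set_self _ _ _ _ (by rw [hzlen]; omega)]
        exact ⟨by norm_num, by decide⟩
      · rw [getD_set_ne _ _ _ _ _ (by omega), hzget t]
        refine ⟨le_refl 0, ?_⟩
        by_cases h0 : t = 0
        · subst h0; simp
        · simp [show ¬ t ≤ 1 by omega]
  · -- rows above i are zero
    intro r hr t
    rw [hrowne r (by omega)]
    by_cases hrin : r < n.toNat + 1
    · rw [hd0get r hrin, hzget t]
    · rw [hd0out r hrin]; rfl
  · -- sums agree
    intro r hr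
    interval_cases r <;> rfl

-- exact (integer) values A stores in row i

lemma inv_step (n : Int) (i : Nat) (hi2 : 2 ≤ i) (hin : i ≤ n.toNat)
    (dp : List (List Int)) (sd : List Int) (rows : List (List Int)) (sums : List Int)
    (h : DPInv n (i-1) (dp, sd) (rows, sums)) :
    DPInv n i (stepA (dp, sd) (i:Int)) (stepB (pascalC n) (rows, sums) (i:Int)) := by
  obtain ⟨h1, h2, h3, h4, h5, h6, h7, h8, h9, h10⟩ := h
  simp only at h1 h2 h3 h4 h5 h6 h7 h8 h9 h10
  have hn2 : 2 ≤ n := by omega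
  obtain ⟨hClen, hCrows⟩ := pascalC_spec n hn2
  -- the Pascal row used at step i
  have hcg : PySem.List.pyGetD (pascalC n) ((i:Int)-1) [] = (pascalC n).getD (i-1) [] := by
    rw [show ((i:Int)-1) = ((i-1 : Nat) : Int) by omega, PySem.List.pyGetD_natCast]
  obtain ⟨hclen, hcent⟩ := hCrows (i-1) (by omega)
  -- A's new table
  have hfoldA := midA_fold n i dp sd hi2 hin h1
    (by rw [show (dp.getD i []) = dp.getD i [] from rfl]; rw [h2 i]; simp [show i < n.toNat + 1 by omega])
    (fun t => h9 i (by omega) t)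
  obtain ⟨hd1, hd2, hd3, hd4⟩ := hfoldA
  -- notation
  set C := pascalC n with hCdef
  set c := PySem.List.pyGetD C ((i:Int)-1) [] with hcdef
  set dp' := (PySem.List.pyRange 1 ((i:Int)+1)).foldl (stepA_j sd (i:Int)) dp with hdp'def
  set first := PySem.Int.mod (((PySem.List.pyRange 0 (i:Int)).map (fun k =>
      PySem.List.pyGetD c k 0 * PySem.List.pyGetD sums ((i:Int)-1-k) 0 *
      PySem.List.pyGetD sums k 0)).sum) pvM with hfirstdef
  set row := (PySem.List.pyRange 2 ((i:Int)+1)).foldl (fun r j =>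
      r ++ [PySem.Int.mod (((PySem.List.pyRange 1 ((i:Int)-j+2)).map (fun k =>
        PySem.List.pyGetD c (k-1) 0 * pvGet2 rows ((i:Int)-k) (j-1) * pvGet2 rows k 1)).sum) pvM])
      [0, first] with hrowdef
  -- row as an explicit list
  have hrowmap : row = [0, first] ++ (PySem.List.pyRange 2 ((i:Int)+1)).map (fun j =>
      PySem.Int.mod (((PySem.List.pyRange 1 ((i:Int)-j+2)).map (fun k =>
        PySem.List.pyGetD c (k-1) 0 * pvGet2 rows ((i:Int)-k) (j-1) * pvGet2 rows k 1)).sum) pvM) := by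
    rw [hrowdef]; exact PySem.List.foldl_append_singleton_eq_map _ _ _
  have hrowlen : row.length = i + 1 := by
    rw [hrowmap]
    simp [pyRange_one_eq_map]
    omega
  have hrowget : ∀ t : Nat, 2 ≤ t → t ≤ i → row.getD t 0 = sB c rows i t := by
    intro t h2t hti
    rw [hrowmap, List.getD_append_right _ _ _ _ (by simp; omega)]
    have hlen2 : ([0, first] : List Int).length = 2 := rfl
    rw [hlen2, pyRange_one_eq_map, List.map_map]
    have hcnt : ((i:Int) + 1 - 2).toNat = i - 1 := by omega
    rw [hcnt]
    rw [PySem.List.getD_map_range _ _ _ _ (by omega : t - 2 < i - 1)]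
    simp only [Function.comp]
    rw [sB]
    have hj : (2:Int) + ((t-2:Nat):Int) = ((t:Nat):Int) := by omega
    rw [hj]
  -- first entry congruence
  have hfirstmod : sA1 sd i % pvM = first := by
    rw [hfirstdef, PySem.Int.mod_eq_emod_of_pos pvM_pos, sA1]
    refine sum_emod_congr _ _ _ ?_
    intro k hk
    rw [PySem.List.mem_pyRange_one] at hk
    rw [PySem.Int.mod_eq_emod_of_pos pvM_pos, emod_emod]
    have hkeq : k = ((k.toNat : Nat) : Int) := by omega
    rw [hkeq]
    have e1 : ((i:Int) - 1 - ((k.toNat:Nat):Int)) = ((i - 1 - k.toNat : Nat) : Int) := by omega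
    have e2 : ((i:Int) - 1) = ((i - 1 : Nat) : Int) := by omega
    rw [e1, e2, nCk_eq_choose (i-1) (i-1-k.toNat) (by omega),
        PySem.List.pyGetD_natCast sd, PySem.List.pyGetD_natCast sd,
        PySem.List.pyGetD_natCast sums, PySem.List.pyGetD_natCast sums,
        h10 (i-1-k.toNat) (by omega), h10 k.toNat (by omega),
        hcg, PySem.List.pyGetD_natCast (C.getD (i-1) []),
        hcent k.toNat (by omega)]
    have hsym : (i-1).choose (i-1-k.toNat) = (i-1).choose k.toNat := by
      have := Nat.choose_symm (n := i-1) (k := k.toNat) (by omega)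
      simpa using this
    rw [hsym]
    exact mul3_emod_congr _ _ _ _ _ _ ((emod_emod _).symm) rfl rfl
  -- middle entries congruence
  have hsBmid : ∀ t : Nat, 2 ≤ t → t < i → sAmid dp i t % pvM = sB c rows i t := by
    intro t h2t hti
    rw [sB, PySem.Int.mod_eq_emod_of_pos pvM_pos, sAmid]
    refine sum_emod_congr _ _ _ ?_
    intro k hk
    rw [PySem.List.mem_pyRange_one] at hk
    rw [PySem.Int.mod_eq_emod_of_pos pvM_pos, emod_emod]
    have hkeq : k = ((k.toNat : Nat) : Int) := by omega
    rw [hkeq]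
    have e2 : ((i:Int) - 1) = ((i - 1 : Nat) : Int) := by omega
    have e3 : (((k.toNat:Nat):Int) - 1) = ((k.toNat - 1 : Nat):Int) := by omega
    have e4 : ((i:Int) - ((k.toNat:Nat):Int)) = ((i - k.toNat : Nat):Int) := by omega
    have e5 : ((t:Nat):Int) - 1 = ((t-1 : Nat):Int) := by omega
    rw [e2, e3, e4, e5, nCk_eq_choose (i-1) (k.toNat-1) (by omega)]
    rw [pvGet2_nonneg dp _ _ (by positivity) (by positivity),
        pvGet2_nonneg dp _ _ (by positivity) (by positivity),
        pvGet2_nonneg rows _ _ (by positivity) (by positivity),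
        pvGet2_nonneg rows _ _ (by positivity) (by positivity)]
    simp only [Int.toNat_natCast, Int.toNat_one]
    rw [hcg, PySem.List.pyGetD_natCast (C.getD (i-1) []), hcent (k.toNat-1) (by omega)]
    have hva := (h8 (i - k.toNat) (by omega) (t-1)).2
    rw [if_pos (by omega : t - 1 ≤ i - k.toNat)] at hva
    have hvb := (h8 k.toNat (by omega) 1).2
    rw [if_pos (by omega : 1 ≤ k.toNat)] at hvb
    refine mul3_emod_congr _ _ _ _ _ _ ((emod_emod _).symm) ?_ ?_
    · rw [← hva, emod_emod]
    · rw [← hvb, emod_emod]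
  -- corner entry: the unified loop yields 1 on the diagonal
  have hsBi : sB c rows i i = 1 := by
    rw [sB]
    have e0 : (i:Int) - (i:Int) + 2 = 2 := by ring
    rw [e0]
    have hr12 : PySem.List.pyRange 1 2 = [1] := by decide
    rw [hr12]
    simp only [List.map_cons, List.map_nil, List.sum_cons, List.sum_nil]
    have e1 : ((1:Int) - 1) = ((0:Nat):Int) := by norm_num
    have e6 : ((i:Int) - 1) = ((i-1 : Nat):Int) := by omega
    rw [e1, e6, hcg, PySem.List.pyGetD_natCast (C.getD (i-1) []), hcent 0 (by omega)]
    rw [pvGet2_nonneg rows _ _ (by positivity) (by positivity),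
        pvGet2_nonneg rows _ _ (by norm_num) (by norm_num)]
    simp only [Int.toNat_natCast, Int.toNat_one]
    rw [h7 (i-1) (by omega) (by omega), h7 1 (by omega) (by omega), Nat.choose_zero_right]
    decide
  -- row entries of B's new row at 0 and 1
  have hrow0 : row.getD 0 0 = 0 := by
    rw [hrowmap, List.getD_append _ _ _ _ (by norm_num)]; rfl
  have hrow1 : row.getD 1 0 = first := by
    rw [hrowmap, List.getD_append _ _ _ _ (by norm_num)]; rfl
  -- A's exact row value reduced mod M is B's row entry
  have hvalmod : ∀ t : Nat, 1 ≤ t → t ≤ i → avalA dp sd i t % pvM = row.getD t 0 := by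
    intro t h1t hti
    by_cases ht1 : t = 1
    · subst ht1
      rw [avalA, if_pos rfl, hfirstmod, hrow1]
    by_cases hti' : t = i
    · subst hti'
      rw [avalA, if_neg ht1, if_pos rfl, hrowget t (by omega) (by omega), hsBi]
      decide
    · rw [avalA, if_neg ht1, if_neg hti', hrowget t (by omega) (by omega)]
      exact hsBmid t (by omega) (by omega)
  -- non-negativity of A's exact row values
  have hnon : ∀ t : Nat, 0 ≤ avalA dp sd i t := by
    intro t
    rw [avalA]
    split
    · refine List.sum_nonneg ?_
      intro x hx
      rcases List.mem_map.mp hx with ⟨k, _, hxx⟩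
      rw [← hxx]
      exact PySem.Int.mod_nonneg _ pvM_pos
    split
    · norm_num
    · refine List.sum_nonneg ?_
      intro x hx
      rcases List.mem_map.mp hx with ⟨k, _, hxx⟩
      rw [← hxx]
      exact PySem.Int.mod_nonneg _ pvM_pos
  -- rows of the extended B table
  have hrows'lt : ∀ r : Nat, r ≤ i-1 → (rows ++ [row]).getD r [] = rows.getD r [] := by
    intro r hr
    exact List.getD_append _ _ _ _ (by omega)
  have hrows'i : (rows ++ [row]).getD i [] = row := by
    rw [List.getD_append_right _ _ _ _ (by omega), h4]
    simp [show i - (i-1+1) = 0 by omega]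
  -- the sums agree at index i
  have hsums_i : PySem.Int.mod ((dp'.getD i []).foldl (· + ·) 0) pvM
      = PySem.Int.mod (row.foldl (· + ·) 0) pvM := by
    rw [PySem.Int.mod_eq_emod_of_pos pvM_pos, PySem.Int.mod_eq_emod_of_pos pvM_pos,
        ← List.sum_eq_foldl, ← List.sum_eq_foldl,
        sum_getD_range (dp'.getD i []), hd3, sum_getD_range row, hrowlen]
    have hsplitn : n.toNat + 1 = (i+1) + (n.toNat - i) := by omega
    rw [hsplitn, List.range_add, List.map_append, List.sum_append]
    have hz2 : ((List.range (n.toNat - i)).map (fun x => (i+1+x))).map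
        (fun t => (dp'.getD i []).getD t 0) = (List.range (n.toNat - i)).map (fun _ => (0:Int)) := by
      rw [List.map_map]
      refine List.map_congr_left fun u _ => ?_
      simp only [Function.comp]
      rw [hd4 (i+1+u), if_neg (by omega)]
    rw [hz2]
    simp only [List.map_const', List.sum_replicate, smul_zero, add_zero]
    refine sum_emod_congr _ _ _ ?_
    intro t ht
    rw [List.mem_range] at ht
    by_cases ht0 : t = 0
    · subst ht0
      rw [hd4 0, if_neg (by omega), hrow0]
    · rw [hd4 t, if_pos (by omega), ← hvalmod t (by omega) (by omega), emod_emod]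
  -- assemble
  have hstepA : stepA (dp, sd) (i:Int) =
      (dp', sd.set i (PySem.Int.mod ((dp'.getD i []).foldl (· + ·) 0) pvM)) := by
    rw [stepA]
    simp only [← hdp'def, Int.toNat_natCast, PySem.List.pyGetD_natCast]
  have hstepB : stepB C (rows, sums) (i:Int) =
      (rows ++ [row], sums ++ [PySem.Int.mod (row.foldl (· + ·) 0) pvM]) := by
    rw [stepB]
  rw [hstepA, hstepB]
  refine ⟨hd1, ?_, by simp only [List.length_set]; exact h3, ?_, ?_, ?_, ?_, ?_, ?_, ?_⟩
  · -- A row lengths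
    intro r
    by_cases hr : r = i
    · subst hr
      rw [hd3, if_pos (by omega)]
    · rw [hd2 r hr, h2 r]
  · simp [h4]; omega
  · simp [h5]; omega
  · -- B row lengths
    intro r hr
    by_cases hri : r = i
    · subst hri
      rw [hrows'i, hrowlen]
    · rw [hrows'lt r (by omega), h6 r (by omega)]
  · -- diagonal
    intro r h1r h2r
    by_cases hri : r = i
    · subst hri
      rw [hrows'i, hrowget r (by omega) (by omega), hsBi]
    · rw [hrows'lt r (by omega), h7 r (by omega) (by omega)]
  · -- entries
    intro r hr t
    by_cases hri : r = i
    · subst hri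
      rw [hd4 t, hrows'i]
      by_cases hcase : 1 ≤ t ∧ t ≤ r
      · rw [if_pos hcase, if_pos (by omega)]
        exact ⟨hnon t, hvalmod t hcase.1 hcase.2⟩
      · rw [if_neg hcase]
        refine ⟨le_refl 0, ?_⟩
        by_cases ht0 : t = 0
        · subst ht0
          rw [if_pos (by omega), hrow0]
          decide
        · rw [if_neg (by omega)]
          decide
    · rw [hd2 r hri, hrows'lt r (by omega)]
      exact h8 r (by omega) t
  · -- rows above i
    intro r hr t
    rw [hd2 r (by omega)]
    exact h9 r (by omega) t
  · -- sums
    intro r hr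
    by_cases hri : r = i
    · subst hri
      rw [getD_set_self _ _ _ _ (by rw [h3]; omega), hsums_i,
          List.getD_append_right _ _ _ _ (by omega), h5]
      simp [show r - (r-1+1) = 0 by omega]
    · rw [getD_set_ne _ _ _ _ _ (by omega), h10 r (by omega),
          List.getD_append _ _ _ _ (by omega)]

lemma inv_main (n : Int) (h : 1 ≤ n) : ∀ i : Nat, 1 ≤ i → i ≤ n.toNat →
    DPInv n i
      ((PySem.List.pyRange 2 ((i:Int)+1)).foldl stepA
        (pvSet2 ((PySem.List.pyRange 0 (n+1)).map (fun _ => (PySem.List.pyRange 0 (n+1)).map (fun _ => (0:Int)))) 1 1 1,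
         [1, 1] ++ List.replicate (n-1).toNat 0))
      ((PySem.List.pyRange 2 ((i:Int)+1)).foldl (stepB (pascalC n)) ([[0],[0,1]], [1,1])) := by
  intro i
  induction i with
  | zero => omega
  | succ i ih =>
    intro h1i hin
    by_cases hi0 : i = 0
    · subst hi0
      have h0 : PySem.List.pyRange 2 (((1:Nat):Int)+1) = [] := by
        rw [pyRange_one_eq_map]; norm_num
      rw [h0]
      exact inv_init n h
    · have hsplit : PySem.List.pyRange 2 (((i+1:Nat):Int)+1) =
          PySem.List.pyRange 2 ((i:Int)+1) ++ [(i:Int)+1] := by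
        have hc : (((i+1:Nat):Int)+1) = ((i:Int)+1) + 1 := by push_cast; ring
        rw [hc]
        exact PySem.List.pyRange_one_succ_right (by omega)
      rw [hsplit, List.foldl_append, List.foldl_append]
      simp only [List.foldl_cons, List.foldl_nil]
      have hprev := ih (by omega) (by omega)
      have hstep := inv_step n (i+1) (by omega) (by omega) _ _ _ _ hprev
      have hc2 : ((i+1:Nat):Int) = (i:Int) + 1 := by push_cast; ring
      rw [hc2] at hstep
      simpa [show i+1-1 = i by omega] using hstep

theorem solution_spec0 : ∀ (n count : Int), Pre_solution n count →
    solution n count = solution_alt n count := by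
  intro n count hpre
  obtain ⟨hn1, hc1, hc2⟩ := hpre
  have hI := inv_main n hn1 n.toNat (by omega) (le_refl _)
  have hcast : ((n.toNat : Nat) : Int) = n := by omega
  rw [hcast] at hI
  obtain ⟨h1, h2, h3, h4, h5, h6, h7, h8, h9, h10⟩ := hI
  simp only [solution, solution_alt]
  set stA := (PySem.List.pyRange 2 (n+1)).foldl stepA
    (pvSet2 ((PySem.List.pyRange 0 (n+1)).map (fun _ => (PySem.List.pyRange 0 (n+1)).map (fun _ => (0:Int)))) 1 1 1,
     [1, 1] ++ List.replicate (n-1).toNat 0) with hstAdef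
  set stB := (PySem.List.pyRange 2 (n+1)).foldl (stepB (pascalC n)) ([[0],[0,1]], [1,1]) with hstBdef
  -- the two final rows have the same length
  have hlenA : (stA.1.getD n.toNat []).length = n.toNat + 1 := by
    rw [h2 n.toNat, if_pos (by omega)]
  have hlenB : (stB.1.getD n.toNat []).length = n.toNat + 1 := h6 n.toNat (le_refl _)
  -- reduce both sides to a common Nat index
  have key : ∀ u : Nat, u ≤ n.toNat →
      PySem.Int.mod ((stA.1.getD n.toNat []).getD u 0) pvM = (stB.1.getD n.toNat []).getD u 0 := by
    intro u hu
    rw [PySem.Int.mod_eq_emod_of_pos pvM_pos, (h8 n.toNat (le_refl _) u).2, if_pos hu]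
  by_cases hcneg : 0 ≤ count
  · have hgA : pvGet2 stA.1 n count = (stA.1.getD n.toNat []).getD count.toNat 0 := by
      rw [pvGet2_nonneg _ _ _ (by omega) hcneg]
    have hgB : pvGet2 stB.1 n count = (stB.1.getD n.toNat []).getD count.toNat 0 := by
      rw [pvGet2_nonneg _ _ _ (by omega) hcneg]
    rw [hgA, hgB]
    exact key count.toNat (by omega)
  · have hgA : pvGet2 stA.1 n count =
        (stA.1.getD n.toNat []).getD (n.toNat + 1 - (-count).toNat) 0 := by
      rw [pvGet2, PySem.List.pyGetD_of_nonneg stA.1 (d := []) (by omega : (0:Int) ≤ n),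
          pyGetD_neg (stA.1.getD n.toNat []) 0 count (by omega)
            (by rw [hlenA]; push_cast; omega), hlenA]
    have hgB : pvGet2 stB.1 n count =
        (stB.1.getD n.toNat []).getD (n.toNat + 1 - (-count).toNat) 0 := by
      rw [pvGet2, PySem.List.pyGetD_of_nonneg stB.1 (d := []) (by omega : (0:Int) ≤ n),
          pyGetD_neg (stB.1.getD n.toNat []) 0 count (by omega)
            (by rw [hlenB]; push_cast; omega), hlenB]
    rw [hgA, hgB]
    exact key _ (by omega)

-- ===== VERDICT (by name: the statement is the Claim_ definition above) =====
theorem solution_spec : Claim_equal_solution := by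
  intro n count _ hpre
  unfold Spec_solution
  exact solution_spec0 n count hpre
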